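-- pv_equiv track=rewrite | github.com/onurgu/neural-turkish-morphological-disambiguator | utils.py | create_single_word_single_line_format
-- ===== SOURCE A (Python) =====
-- def create_single_word_single_line_format(string_output):
--     lines = string_output.split("\n")
--     result = "<S> <S>+BSTag\n"
--     current_single_line = ""
--     subline_idx = 0
--     for line in lines:
--         if line != "":
--             tokens = line.split("\t")
--             if subline_idx == 0:
--                 current_single_line += tokens[0]
--                 current_single_line += " " + tokens[1] + tokens[2]
--             else:
--                 current_single_line += " " + tokens[1] + tokens[2]
--             subline_idx += 1
--         else:
--             result += current_single_line + "\n"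
--             subline_idx = 0
--             current_single_line = ""
--     result = result[:-1]
--     result += "</S> </S>+ESTag\n"
--     return result
-- ===== SOURCE B (Python) =====
-- def _parse(line):
--     # one non-empty output line -> [surface form, " " + analysis1 + analysis2]
--     tokens = line.split("\t")
--     return [tokens[0], " " + tokens[1] + tokens[2]]
--
--
-- def _format_block(block):
--     if not block:
--         return ""
--     return block[0][0] + "".join(entry[1] for entry in block)
--
--
-- def create_single_word_single_line_format(string_output):
--     # Parse every line first ([] marks an empty line), cut the parsed list into
--     # word-blocks at the empty-line markers (the tail after the last marker is
--     # never flushed, exactly as in the original), format each block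
--     # independently and assemble the document in one go.
--     parsed = [_parse(line) if line != "" else []
--               for line in string_output.split("\n")]
--     blocks = []
--     while [] in parsed:
--         i = parsed.index([])
--         blocks.append(parsed[:i])
--         parsed = parsed[i + 1:]
--     body = "".join(_format_block(b) + "\n" for b in blocks)
--     return ("<S> <S>+BSTag\n" + body)[:-1] + "</S> </S>+ESTag\n"
-- ===== Notes on version B (the rewrite author's own statement) =====
-- stated objective: alternative
-- what changed: B replaces A's single-pass accumulator state machine (result/current_single_line/subline_idx flushed at each empty line) by a parse-then-group-then-format pipeline: every line is parsed up front, the parsed list is cut into word-blocks by repeated index()/slicing, and each block is formatted independently with a join.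
import Mathlib
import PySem

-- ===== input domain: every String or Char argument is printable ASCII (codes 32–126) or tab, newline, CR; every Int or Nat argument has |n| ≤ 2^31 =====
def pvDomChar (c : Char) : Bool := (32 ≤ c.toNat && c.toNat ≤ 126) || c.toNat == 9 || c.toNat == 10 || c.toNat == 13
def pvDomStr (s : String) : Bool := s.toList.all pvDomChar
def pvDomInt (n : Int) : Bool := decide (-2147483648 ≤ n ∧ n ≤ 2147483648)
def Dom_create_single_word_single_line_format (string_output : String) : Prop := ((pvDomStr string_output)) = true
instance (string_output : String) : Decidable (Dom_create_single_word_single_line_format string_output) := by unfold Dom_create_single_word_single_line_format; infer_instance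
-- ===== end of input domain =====

-- B is a parse -> group -> format pipeline: it parses every line up front, cuts the parsed
-- list into word-blocks by repeated index/slice and formats each block independently with a
-- join (alternative decomposition; no running accumulator state machine). Pre_ excludes the
-- inputs on which both Pythons raise IndexError (a non-empty line with fewer than three
-- tab-separated tokens).


-- ===== PORT A =====
-- the loop body of A (state: result, current_single_line, subline_idx); tokens[k] is
-- PySem.List.pyGetD with default "" — in range on every input Pre_ admits
def pvStepA (st : String × String × Int) (line : String) : String × String × Int :=
  if line ≠ "" then
    let tokens := (PySem.Str.split? line "\t").getD []
    if st.2.2 == 0 then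
      (st.1, st.2.1 ++ PySem.List.pyGetD tokens 0 "" ++ (" " ++ PySem.List.pyGetD tokens 1 "" ++ PySem.List.pyGetD tokens 2 ""), st.2.2 + 1)
    else
      (st.1, st.2.1 ++ (" " ++ PySem.List.pyGetD tokens 1 "" ++ PySem.List.pyGetD tokens 2 ""), st.2.2 + 1)
  else
    (st.1 ++ st.2.1 ++ "\n", "", 0)

def create_single_word_single_line_format (string_output : String) : String :=
  let lines := (PySem.Str.split? string_output "\n").getD []   -- sep "\n" ≠ "": split? is always some
  let st := lines.foldl pvStepA ("<S> <S>+BSTag\n", "", 0)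
  PySem.Str.slice st.1 none (some (-1)) ++ "</S> </S>+ESTag\n"

-- ===== PORT B =====
-- _parse of Source B; tokens[k] is PySem.List.pyGetD with default "" — in range on every input Pre_ admits
def pvParse (line : String) : List String :=
  let tokens := (PySem.Str.split? line "\t").getD []
  [PySem.List.pyGetD tokens 0 "",
   " " ++ PySem.List.pyGetD tokens 1 "" ++ PySem.List.pyGetD tokens 2 ""]

-- _format_block of Source B (block entries are parsed pairs, never the empty-line marker [];
-- the pyGetD defaults are the unreachable out-of-range cases)
def pvFormatBlock (block : List (List String)) : String :=
  if block = [] then ""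
  else
    PySem.List.pyGetD (PySem.List.pyGetD block 0 []) 0 "" ++
      PySem.Str.join "" (block.map (fun entry => PySem.List.pyGetD entry 1 ""))

-- the `while [] in parsed:` loop of Source B (index/slice off one block per iteration)
def pvBlocks (parsed : List (List String)) : List (List (List String)) :=
  if h : ([] : List String) ∈ parsed then
    match PySem.List.index? parsed ([] : List String) with
    | some i =>
        PySem.List.slice parsed none (some (i : Int)) ::
          pvBlocks (PySem.List.slice parsed (some ((i : Int) + 1)) none)
    | none => []   -- unreachable: guarded by `[] ∈ parsed`
  else []
termination_by parsed.length
decreasing_by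
  have : ((i : Int) + 1) = ((i + 1 : Nat) : Int) := by push_cast; ring
  rw [this, PySem.List.slice_from_natCast]
  have hne : parsed ≠ [] := by rintro rfl; simp at h
  have hpos : 0 < parsed.length := List.length_pos_iff.mpr hne
  simp [List.length_drop]
  omega

def create_single_word_single_line_format_alt (string_output : String) : String :=
  let lines := (PySem.Str.split? string_output "\n").getD []
  let parsed := lines.map (fun line => if line ≠ "" then pvParse line else [])
  let blocks := pvBlocks parsed
  let body := PySem.Str.join "" (blocks.map (fun b => pvFormatBlock b ++ "\n"))
  PySem.Str.slice ("<S> <S>+BSTag\n" ++ body) none (some (-1)) ++ "</S> </S>+ESTag\n"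

-- ===== PRECONDITION & SPEC =====
-- Pre_ excludes exactly the inputs where the Python A raises IndexError: some non-empty
-- line has fewer than three tab-separated tokens (tokens[1]/tokens[2] out of range).
def Pre_create_single_word_single_line_format (string_output : String) : Prop :=
  ∀ line ∈ (PySem.Str.split? string_output "\n").getD [],
    line ≠ "" → 3 ≤ ((PySem.Str.split? line "\t").getD []).length
instance (string_output : String) : Decidable (Pre_create_single_word_single_line_format string_output) := by unfold Pre_create_single_word_single_line_format; infer_instance

def pvWitness_create_single_word_single_line_format : String := "a\tb\tc\nd\te\tf\n\ng\th\ti\n"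

def Spec_create_single_word_single_line_format (string_output : String) (out : String) : Prop := out = create_single_word_single_line_format_alt string_output
instance (string_output : String) (out : String) : Decidable (Spec_create_single_word_single_line_format string_output out) := by unfold Spec_create_single_word_single_line_format; infer_instance

-- ===== CLAIM (what is proved, stated in full; the proofs are below) =====
def Claim_equal_create_single_word_single_line_format : Prop := ∀ (string_output : String), Dom_create_single_word_single_line_format string_output → Pre_create_single_word_single_line_format string_output → Spec_create_single_word_single_line_format string_output (create_single_word_single_line_format string_output)
-- ===== LEMMAS AND PROOFS =====

-- the canonical block decomposition: cut at every separator, drop the trailing block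
def pvBlocksOf {α : Type} [DecidableEq α] (sep : α) : List α → List (List α)
  | [] => []
  | l :: rest =>
      if l = sep then [] :: pvBlocksOf sep rest
      else
        match pvBlocksOf sep rest with
        | [] => []
        | b :: bs => (l :: b) :: bs

-- the " " + tokens[1] + tokens[2] contribution of one line
def pvCont (line : String) : String :=
  " " ++ PySem.List.pyGetD ((PySem.Str.split? line "\t").getD []) 1 ""
    ++ PySem.List.pyGetD ((PySem.Str.split? line "\t").getD []) 2 ""

def pvHead (line : String) : String :=
  PySem.List.pyGetD ((PySem.Str.split? line "\t").getD []) 0 ""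

def pvJoinCont (b : List String) : String := PySem.Str.join "" (b.map pvCont)

def pvFmt : List String → String
  | [] => ""
  | l :: rest => pvHead l ++ pvJoinCont (l :: rest)

-- the per-line encoding performed by B's parsing comprehension
def pvEnc (line : String) : List String := if line ≠ "" then pvParse line else []

lemma pvJoinE_nil : PySem.Str.join "" ([] : List String) = "" := by
  apply String.toList_inj.mp
  simp [PySem.Str.toList_join, PySem.Chars.join_nil]

lemma pvJoinE_cons (p : String) (ps : List String) :
    PySem.Str.join "" (p :: ps) = p ++ PySem.Str.join "" ps := by
  apply String.toList_inj.mp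
  cases ps with
  | nil => simp [PySem.Str.toList_join, PySem.Chars.join_singleton, PySem.Chars.join_nil]
  | cons q qs => simp [PySem.Str.toList_join, PySem.Chars.join_cons_cons]

lemma pvFormatBlock_eq (b : List String) (hb : ∀ l ∈ b, l ≠ "") :
    pvFormatBlock (b.map pvEnc) = pvFmt b := by
  cases b with
  | nil => rfl
  | cons l ls =>
      have hl : l ≠ "" := hb l (List.mem_cons_self)
      have hmap : ∀ x ∈ ls, PySem.List.pyGetD (pvEnc x) 1 "" = pvCont x := by
        intro x hx
        have hx' : x ≠ "" := hb x (List.mem_cons_of_mem _ hx)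
        simp [pvEnc, hx', pvParse, pvCont, PySem.List.pyGetD_ofNat']
      unfold pvFormatBlock
      simp only [List.map_cons]
      rw [if_neg (by simp)]
      simp only [List.map_map]
      rw [show ((fun entry => PySem.List.pyGetD entry 1 "") ∘ pvEnc)
            = (fun x => PySem.List.pyGetD (pvEnc x) 1 "") from rfl]
      rw [List.map_congr_left hmap]
      simp [pvEnc, hl, pvParse, pvHead, pvCont, pvFmt, pvJoinCont, PySem.List.pyGetD_ofNat']

lemma pvBlocks_cons (l : List String) (rest : List (List String)) :
    pvBlocks (l :: rest) =
      (if l = [] then [] :: pvBlocks rest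
       else match pvBlocks rest with
            | [] => []
            | b :: bs => (l :: b) :: bs) := by
  by_cases hl : l = ([] : List String)
  · subst hl
    rw [pvBlocks]
    rw [dif_pos (List.mem_cons_self)]
    rw [PySem.List.index?_cons_self]
    norm_num [PySem.List.slice_to, PySem.List.slice_from_one]
  · by_cases hm : ([] : List String) ∈ rest
    · obtain ⟨j, hj⟩ := Option.isSome_iff_exists.mp (PySem.List.index?_isSome_iff rest ([] : List String) |>.mpr hm)
      rw [pvBlocks]
      rw [dif_pos (List.mem_cons_of_mem _ hm)]
      rw [PySem.List.index?_cons_of_ne rest hl, hj]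
      have e1 : PySem.List.slice (l :: rest) none (some (((j+1:Nat)):Int)) = l :: PySem.List.slice rest none (some (j:Int)) := by
        rw [PySem.List.slice_to_natCast, PySem.List.slice_to_natCast, List.take_succ_cons]
      have e2 : PySem.List.slice (l :: rest) (some (((j+1:Nat):Int)+1)) none = PySem.List.slice rest (some ((j:Int)+1)) none := by
        have c1 : (((j+1:Nat):Int)+1) = ((j+2:Nat):Int) := by push_cast; ring
        have c2 : ((j:Int)+1) = ((j+1:Nat):Int) := by push_cast; ring
        rw [c1, c2, PySem.List.slice_from_natCast, PySem.List.slice_from_natCast, List.drop_succ_cons]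
      simp only [Option.map_some]
      rw [e1, e2]
      conv_rhs => rw [pvBlocks, dif_pos hm, hj]
      simp [hl]
    · have hnm : ([] : List String) ∉ l :: rest := by
        simp [hm, Ne.symm hl]
      rw [pvBlocks, dif_neg hnm, if_neg hl]
      rw [pvBlocks, dif_neg hm]

lemma pvBlocks_eq (parsed : List (List String)) :
    pvBlocks parsed = pvBlocksOf ([] : List String) parsed := by
  induction parsed with
  | nil => rw [pvBlocks]; simp [pvBlocksOf]
  | cons l rest ih =>
      rw [pvBlocks_cons, ih]
      conv_rhs => rw [pvBlocksOf]
      split_ifs with hif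
      · rfl
      · cases pvBlocksOf ([] : List String) rest <;> rfl

lemma pvEnc_eq_nil_iff (line : String) : pvEnc line = [] ↔ line = "" := by
  by_cases h : line = "" <;> simp [pvEnc, h, pvParse]

-- grouping commutes with B's per-line encoding (empty line ↔ marker [])
lemma pvBlocksOf_map_enc (lines : List String) :
    pvBlocksOf ([] : List String) (lines.map pvEnc) =
      (pvBlocksOf "" lines).map (List.map pvEnc) := by
  induction lines with
  | nil => simp [pvBlocksOf]
  | cons l rest ih =>
      by_cases hl : l = ""
      · simp [pvBlocksOf, hl, pvEnc, ih]
      · have he : pvEnc l ≠ [] := by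
          simp [pvEnc_eq_nil_iff, hl]
        cases hb : pvBlocksOf "" rest with
        | nil => simp [pvBlocksOf, hl, he, ih, hb]
        | cons b bs => simp [pvBlocksOf, hl, he, ih, hb]

-- no block of the decomposition contains a separator
lemma pvBlocksOf_mem_ne {α : Type} [DecidableEq α] (sep : α) (xs : List α) :
    ∀ b ∈ pvBlocksOf sep xs, ∀ x ∈ b, x ≠ sep := by
  induction xs with
  | nil => intro b hb; simp [pvBlocksOf] at hb
  | cons l rest ih =>
      intro b hb x hx
      by_cases hl : l = sep
      · simp only [pvBlocksOf, if_pos hl] at hb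
        rcases List.mem_cons.mp hb with rfl | hb'
        · simp at hx
        · exact ih b hb' x hx
      · simp only [pvBlocksOf, if_neg hl] at hb
        rcases hcc : pvBlocksOf sep rest with - | ⟨c, cs⟩
        · rw [hcc] at hb
          simp at hb
        · rw [hcc] at hb
          rcases List.mem_cons.mp hb with rfl | hb'
          · rcases List.mem_cons.mp hx with rfl | hx'
            · exact hl
            · exact ih c (by rw [hcc]; exact List.mem_cons_self) x hx'
          · exact ih b (by rw [hcc]; exact List.mem_cons_of_mem _ hb') x hx

def pvStepFmt (idx : Int) (b : List String) : String :=
  if idx == 0 then pvFmt b else pvJoinCont b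

lemma pvStepFmt_nil (idx : Int) : pvStepFmt idx [] = "" := by
  simp [pvStepFmt, pvFmt, pvJoinCont, pvJoinE_nil]

lemma pvFoldA (lines : List String) (res cur : String) (idx : Int) (h : 0 ≤ idx) :
    (lines.foldl pvStepA (res, cur, idx)).1 =
      (match pvBlocksOf "" lines with
       | [] => res
       | b :: bs =>
           res ++ (cur ++ pvStepFmt idx b ++ "\n") ++
             PySem.Str.join "" (bs.map (fun b => pvFmt b ++ "\n"))) := by
  induction lines generalizing res cur idx with
  | nil => simp [pvBlocksOf]
  | cons l rest ih =>
      by_cases hl : l = ""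
      · subst hl
        rw [List.foldl_cons]
        have hstep : pvStepA (res, cur, idx) "" = (res ++ cur ++ "\n", "", 0) := by
          simp [pvStepA]
        rw [hstep, ih _ _ _ (le_refl 0)]
        cases hb : pvBlocksOf "" rest with
        | nil =>
            simp [pvBlocksOf, hb, pvStepFmt_nil, pvJoinE_nil,
              String.append_assoc, String.append_empty]
        | cons b bs =>
            simp [pvBlocksOf, hb, pvStepFmt, pvFmt, pvJoinCont, pvJoinE_nil, pvJoinE_cons,
              String.append_assoc, String.append_empty, String.empty_append]
      · rw [List.foldl_cons]
        have hi1 : ¬ (idx + 1 == 0) = true := by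
          simp only [beq_iff_eq]
          omega
        by_cases h0 : idx = 0
        · subst h0
          have hstep : pvStepA (res, cur, 0) l = (res, cur ++ pvHead l ++ pvCont l, 1) := by
            simp [pvStepA, hl, pvHead, pvCont]
          rw [hstep, ih _ _ _ (by omega)]
          cases hb : pvBlocksOf "" rest with
          | nil => simp [pvBlocksOf, hb, hl]
          | cons b bs =>
              simp [pvBlocksOf, hb, hl, pvStepFmt, pvFmt, pvJoinCont, pvJoinE_cons,
                String.append_assoc]
        · have hne0 : ¬ (idx == 0) = true := by
            simp only [beq_iff_eq]
            omega
          have hstep : pvStepA (res, cur, idx) l = (res, cur ++ pvCont l, idx + 1) := by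
            simp [pvStepA, hl, hne0, pvCont]
          rw [hstep, ih _ _ _ (by omega)]
          cases hb : pvBlocksOf "" rest with
          | nil => simp [pvBlocksOf, hb, hl]
          | cons b bs =>
              simp [pvBlocksOf, hb, hl, pvStepFmt, hne0, hi1, pvJoinCont, pvJoinE_cons,
                String.append_assoc]

lemma pvMain (lines : List String) :
    (lines.foldl pvStepA ("<S> <S>+BSTag\n", "", 0)).1 =
      "<S> <S>+BSTag\n" ++ PySem.Str.join "" ((pvBlocksOf "" lines).map (fun b => pvFmt b ++ "\n")) := by
  rw [pvFoldA lines _ _ _ (le_refl 0)]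
  cases hb : pvBlocksOf "" lines with
  | nil => simp [pvJoinE_nil]
  | cons b bs =>
      simp [pvStepFmt, pvJoinE_cons, String.append_assoc, String.empty_append]

-- ===== VERDICT (by name: the statement is the Claim_ definition above) =====
theorem create_single_word_single_line_format_spec : Claim_equal_create_single_word_single_line_format := by
  intro s _ _
  unfold Spec_create_single_word_single_line_format
  simp only [create_single_word_single_line_format, create_single_word_single_line_format_alt]
  rw [pvMain, pvBlocks_eq]
  have henc : (fun line => if line ≠ "" then pvParse line else []) = pvEnc := by
    funext line
    simp [pvEnc]
  rw [henc, pvBlocksOf_map_enc, List.map_map]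
  have hcong :
      ∀ b ∈ pvBlocksOf "" ((PySem.Str.split? s "\n").getD []),
        ((fun b => pvFormatBlock b ++ "\n") ∘ List.map pvEnc) b = pvFmt b ++ "\n" := by
    intro b hbm
    simp only [Function.comp]
    rw [pvFormatBlock_eq b (pvBlocksOf_mem_ne "" _ b hbm)]
  rw [List.map_congr_left hcong]
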